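-- pv_equiv track=rewrite | github.com/thu-pacman/ChituDiffusion | chitu_core/distributed/parallel_state.py | _get_second_level_rank_lists
-- ===== SOURCE A (Python) =====
-- def _get_second_level_rank_lists(
--     first_level_size: int, second_level_size: int, world_size: int
-- ):
--     assert world_size % (first_level_size * second_level_size) == 0
--     rank_lists = []
--     for i in range(world_size // (first_level_size * second_level_size)):
--         for j in range(first_level_size):
--             rank_lists.append(
--                 list(
--                     range(
--                         i * first_level_size * second_level_size + j,
--                         (i + 1) * first_level_size * second_level_size + j,
--                         first_level_size,
--                     )
--                 )
--             )
--     return rank_lists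
-- ===== SOURCE B (Python) =====
-- def _get_second_level_rank_lists(
--     first_level_size: int, second_level_size: int, world_size: int
-- ):
--     assert world_size % (first_level_size * second_level_size) == 0
--     block = first_level_size * second_level_size
--     num_groups = world_size // block
--     rank_lists = [[] for _ in range(num_groups * first_level_size)]
--     for r in range(world_size):
--         i = r // block
--         j = (r % block) % first_level_size
--         rank_lists[i * first_level_size + j].append(r)
--     return rank_lists
-- ===== Notes on version B (the rewrite author's own statement) =====
-- stated objective: alternative
-- what changed: Replaces the nested generate-each-strided-range loops by a single flat scatter pass: preallocate num_groups*first_level_size empty buckets and route each rank r once to bucket (r//block)*first_level_size + (r%block)%first_level_size.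
-- outside the precondition, e.g. on _get_second_level_rank_lists(-1, 1, 2): A returns [], B returns [[0], [1]]; on _get_second_level_rank_lists(1, -1, 2): A returns [], B raises IndexError; on _get_second_level_rank_lists(-2, -1, -2): A returns [], B returns [[], []]
import Mathlib
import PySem

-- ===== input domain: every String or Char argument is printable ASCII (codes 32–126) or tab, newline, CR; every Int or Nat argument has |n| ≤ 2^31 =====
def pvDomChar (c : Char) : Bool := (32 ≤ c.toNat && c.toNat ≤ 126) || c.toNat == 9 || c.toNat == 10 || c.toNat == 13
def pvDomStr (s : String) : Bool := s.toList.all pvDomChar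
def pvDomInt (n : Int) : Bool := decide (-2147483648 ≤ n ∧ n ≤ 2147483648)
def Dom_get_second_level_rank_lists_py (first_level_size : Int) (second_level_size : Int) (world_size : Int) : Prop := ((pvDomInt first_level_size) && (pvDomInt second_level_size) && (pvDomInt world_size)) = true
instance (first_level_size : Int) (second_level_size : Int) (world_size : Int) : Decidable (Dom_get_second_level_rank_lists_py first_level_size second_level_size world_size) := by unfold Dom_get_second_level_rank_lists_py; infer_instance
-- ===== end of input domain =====

-- B replaces A's nested strided-range generation by a single flat scatter pass over all ranks (alternative decomposition, same O(world_size) cost).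

-- ===== PORT A =====
def get_second_level_rank_lists_py (first_level_size : Int) (second_level_size : Int) (world_size : Int) : List (List Int) :=
  (PySem.List.pyRange 0 (PySem.Int.floordiv world_size (first_level_size * second_level_size)) 1).foldl
    (fun rank_lists i =>
      (PySem.List.pyRange 0 first_level_size 1).foldl
        (fun rank_lists j =>
          rank_lists ++ [PySem.List.pyRange (i * first_level_size * second_level_size + j)
            ((i + 1) * first_level_size * second_level_size + j) first_level_size])
        rank_lists)
    []

-- ===== PORT B =====
def get_second_level_rank_lists_py_alt (first_level_size : Int) (second_level_size : Int) (world_size : Int) : List (List Int) :=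
  let block := first_level_size * second_level_size
  let num_groups := PySem.Int.floordiv world_size block
  let init := List.replicate (num_groups * first_level_size).toNat ([] : List Int)
  (PySem.List.pyRange 0 world_size 1).foldl
    (fun rank_lists r =>
      let i := PySem.Int.floordiv r block
      let j := PySem.Int.mod (PySem.Int.mod r block) first_level_size
      rank_lists.modify (i * first_level_size + j).toNat (fun l => l ++ [r]))
    init

-- ===== PRECONDITION & SPEC =====
-- Pre_ excludes inputs where A raises (zero block via ZeroDivisionError, failed divisibility assert) and the
-- degenerate corners with a non-positive first (resp. second) level size and nonzero (resp. positive) world_size: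
-- those lie outside the function's natural domain and A's output there ([] from empty range loops) is an
-- implementation artefact which B's scatter cannot reproduce (B raises IndexError or shapes buckets differently).
def Pre_get_second_level_rank_lists_py (first_level_size : Int) (second_level_size : Int) (world_size : Int) : Prop :=
  world_size % (first_level_size * second_level_size) = 0 ∧
  first_level_size * second_level_size ≠ 0 ∧
  (0 < first_level_size ∨ world_size = 0) ∧
  (0 < second_level_size ∨ world_size ≤ 0)
instance (first_level_size : Int) (second_level_size : Int) (world_size : Int) : Decidable (Pre_get_second_level_rank_lists_py first_level_size second_level_size world_size) := by unfold Pre_get_second_level_rank_lists_py; infer_instance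

def pvWitness_get_second_level_rank_lists_py : Int × Int × Int := (2, 2, 8)

def Spec_get_second_level_rank_lists_py (first_level_size : Int) (second_level_size : Int) (world_size : Int) (out : List (List Int)) : Prop := out = get_second_level_rank_lists_py_alt first_level_size second_level_size world_size
instance (first_level_size : Int) (second_level_size : Int) (world_size : Int) (out : List (List Int)) : Decidable (Spec_get_second_level_rank_lists_py first_level_size second_level_size world_size out) := by unfold Spec_get_second_level_rank_lists_py; infer_instance

-- ===== CLAIM (what is proved, stated in full; the proofs are below) =====
def Claim_equal_get_second_level_rank_lists_py : Prop := ∀ (first_level_size : Int) (second_level_size : Int) (world_size : Int), Dom_get_second_level_rank_lists_py first_level_size second_level_size world_size → Pre_get_second_level_rank_lists_py first_level_size second_level_size world_size → Spec_get_second_level_rank_lists_py first_level_size second_level_size world_size (get_second_level_rank_lists_py first_level_size second_level_size world_size)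



-- ===== LEMMAS AND PROOFS =====

-- Two strictly increasing integer lists with the same members are equal.
theorem pv_eq_of_pairwise_lt_of_mem_iff : ∀ {xs ys : List Int},
    List.Pairwise (· < ·) xs → List.Pairwise (· < ·) ys → (∀ a, a ∈ xs ↔ a ∈ ys) → xs = ys := by
  intro xs
  induction xs with
  | nil =>
    intro ys _ _ h
    cases ys with
    | nil => rfl
    | cons y ys =>
      have hy := (h y).mpr (by simp)
      simp at hy
  | cons x xs ih =>
    intro ys hx hy h
    cases ys with
    | nil =>
      have hx' := (h x).mp (by simp)
      simp at hx'
    | cons y ys =>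
      have hxlt : ∀ a ∈ xs, x < a := fun a ha => List.rel_of_pairwise_cons hx ha
      have hylt : ∀ a ∈ ys, y < a := fun a ha => List.rel_of_pairwise_cons hy ha
      have hxy : x = y := by
        rcases List.mem_cons.mp ((h x).mp (by simp)) with h1 | h1
        · exact h1
        · rcases List.mem_cons.mp ((h y).mpr (by simp)) with h2 | h2
          · omega
          · have hb1 := hylt x h1
            have hb2 := hxlt y h2
            omega
      subst hxy
      have htail : ∀ a, a ∈ xs ↔ a ∈ ys := by
        intro a
        constructor
        · intro ha
          rcases List.mem_cons.mp ((h a).mp (List.mem_cons_of_mem _ ha)) with h1 | h1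
          · have := hxlt a ha; omega
          · exact h1
        · intro ha
          rcases List.mem_cons.mp ((h a).mpr (List.mem_cons_of_mem _ ha)) with h1 | h1
          · have := hylt a ha; omega
          · exact h1
      rw [ih hx.of_cons hy.of_cons htail]

-- Scatter fold: bucket t of the result is bucket t of init followed by the routed elements in order.
theorem pv_scatter_get? (idx : Int → Nat) : ∀ (rs : List Int) (init : List (List Int)) (t : Nat),
    (rs.foldl (fun acc r => acc.modify (idx r) (fun l => l ++ [r])) init)[t]? =
      (init[t]?).map (fun v => v ++ rs.filter (fun r => idx r == t)) := by
  intro rs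
  induction rs with
  | nil =>
    intro init t
    simp
  | cons r rs ih =>
    intro init t
    simp only [List.foldl_cons, List.filter_cons]
    rw [ih, List.getElem?_modify]
    cases hinit : init[t]? with
    | none => simp
    | some v =>
      by_cases hidx : idx r = t
      · simp [hidx]
      · have hbe : (idx r == t) = false := by simp [hidx]
        simp [hbe, hidx]

-- Flat indexing over a G×F grid equals the nested traversal.
theorem pv_range_mul_flatMap {α : Type} (F : Nat) (g : Nat → α) : ∀ (G : Nat),
    (List.range (G * F)).map g =
      (List.range G).flatMap (fun i => (List.range F).map (fun j => g (i * F + j))) := by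
  intro G
  induction G with
  | zero => simp
  | succ G ih =>
    rw [Nat.succ_mul, List.range_add, List.map_append, ih, List.range_succ,
      List.flatMap_append, List.flatMap_singleton, List.map_map]
    simp [Function.comp]

-- The ranks scattered into bucket i*F+j are exactly A's strided range for (i, j).
theorem pv_bucket_eq (f s ws : Int) (hf : 0 < f) (hs : 0 < s) (_hws : 0 ≤ ws)
    (hdvd : f * s ∣ ws) (i j : Nat) (hi : (i : Int) < ws / (f * s)) (hj : (j : Int) < f) :
    (PySem.List.pyRange 0 ws 1).filter
        (fun r => ((r / (f * s) * f + r % (f * s) % f).toNat == i * f.toNat + j)) =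
      PySem.List.pyRange ((i : Int) * f * s + (j : Int)) (((i : Int) + 1) * f * s + (j : Int)) f := by
  have hblock : 0 < f * s := mul_pos hf hs
  have hj0 : (0 : Int) ≤ (j : Int) := by exact_mod_cast Nat.zero_le j
  have hi0 : (0 : Int) ≤ (i : Int) := by exact_mod_cast Nat.zero_le i
  apply pv_eq_of_pairwise_lt_of_mem_iff
  · exact List.Pairwise.filter _ (PySem.List.pairwise_lt_pyRange_one 0 ws)
  · rw [PySem.List.pyRange_of_pos _ _ hf]
    refine List.Pairwise.map _ ?_ List.pairwise_lt_range
    intro a b hab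
    have hab' : (a : Int) < b := by exact_mod_cast hab
    nlinarith
  · intro x
    rw [List.mem_filter, PySem.List.mem_pyRange_one, PySem.List.mem_pyRange_iff_of_pos hf]
    have hsplit := Int.ediv_add_emod x (f * s)
    have hsplitf := Int.ediv_add_emod (x % (f * s)) f
    constructor
    · rintro ⟨⟨hx0, hxw⟩, hp⟩
      have hq0 : 0 ≤ x / (f * s) := Int.ediv_nonneg hx0 hblock.le
      have hm0 : 0 ≤ x % (f * s) := Int.emod_nonneg x hblock.ne'
      have hmf0 : 0 ≤ x % (f * s) % f := Int.emod_nonneg _ hf.ne'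
      have hmf1 : x % (f * s) % f < f := Int.emod_lt_of_pos _ hf
      have hmlt : x % (f * s) < f * s := Int.emod_lt_of_pos x hblock
      have hE : x / (f * s) * f + x % (f * s) % f = (i : Int) * f + j := by
        have hge : 0 ≤ x / (f * s) * f + x % (f * s) % f :=
          add_nonneg (mul_nonneg hq0 hf.le) hmf0
        have hcast := congrArg (fun n : Nat => (n : Int)) (beq_iff_eq.mp hp)
        simp only [Int.toNat_of_nonneg hge] at hcast
        rw [hcast]
        push_cast [Int.toNat_of_nonneg hf.le]
        ring
      have h1 : (x / (f * s) - i) * f = (j : Int) - x % (f * s) % f := by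
        linear_combination hE
      have hqi : x / (f * s) = (i : Int) := by
        rcases lt_trichotomy (x / (f * s) - i) 0 with hc | hc | hc
        · exfalso
          have hc' : x / (f * s) - i ≤ -1 := by
            have := Int.lt_iff_add_one_le.mp hc
            linarith
          nlinarith
        · linarith
        · exfalso
          have hc' : 1 ≤ x / (f * s) - i := by
            have := Int.lt_iff_add_one_le.mp hc
            linarith
          nlinarith
      have hmj : x % (f * s) % f = (j : Int) := by
        linear_combination h1 - f * hqi
      have hdivf0 : 0 ≤ x % (f * s) / f := Int.ediv_nonneg hm0 hf.le
      have hfd : 0 ≤ f * (x % (f * s) / f) := mul_nonneg hf.le hdivf0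
      have hx : x = (f * s) * (i : Int) + x % (f * s) := by
        rw [← hqi]; linarith [hsplit]
      have hMj : (j : Int) ≤ x % (f * s) := by linarith [hsplitf, hfd, hmj]
      have e1 : (i : Int) * f * s = (f * s) * i := by ring
      have e2 : ((i : Int) + 1) * f * s = (f * s) * i + f * s := by ring
      refine ⟨by linarith, by linarith, ?_⟩
      refine ⟨x % (f * s) / f, ?_⟩
      linear_combination (f * s) * hqi - hsplit - hsplitf + hmj
    · rintro ⟨hl, hu, hd⟩
      obtain ⟨k, hk⟩ := hd
      have hk' : x = (i : Int) * f * s + j + f * k := by linarith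
      have hifs : 0 ≤ (i : Int) * f * s := by positivity
      have hk0 : 0 ≤ k := by nlinarith
      have hks : k < s := by nlinarith
      have hfk : f * k ≤ f * (s - 1) := mul_le_mul_of_nonneg_left (by linarith) hf.le
      have hfk' : f * (s - 1) = f * s - f := by ring
      have hfk0 : 0 ≤ f * k := mul_nonneg hf.le hk0
      have hx0 : 0 ≤ x := by linarith
      have hxw : x < ws := by
        have hi1 : (i : Int) + 1 ≤ ws / (f * s) := Int.lt_iff_add_one_le.mp hi
        have hmul : ((i : Int) + 1) * (f * s) ≤ ws / (f * s) * (f * s) :=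
          mul_le_mul_of_nonneg_right hi1 hblock.le
        have hcan : ws / (f * s) * (f * s) = ws := Int.ediv_mul_cancel hdvd
        have e3 : ((i : Int) + 1) * (f * s) = (i : Int) * f * s + f * s := by ring
        linarith
      have hjk0 : (0 : Int) ≤ (j : Int) + f * k := by linarith
      have hjklt : (j : Int) + f * k < f * s := by linarith
      have hxe : x = ((j : Int) + f * k) + (i : Int) * (f * s) := by linear_combination hk'
      have hxe' : x = ((j : Int) + f * k) + (f * s) * (i : Int) := by linear_combination hk'
      have hqe : x / (f * s) = (i : Int) := by
        rw [hxe, Int.add_mul_ediv_right _ _ hblock.ne', Int.ediv_eq_zero_of_lt hjk0 hjklt,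
          zero_add]
      have hme : x % (f * s) = (j : Int) + f * k := by
        rw [hxe', Int.add_mul_emod_self_left, Int.emod_eq_of_lt hjk0 hjklt]
      have hmje : x % (f * s) % f = (j : Int) := by
        rw [hme, Int.add_mul_emod_self_left, Int.emod_eq_of_lt hj0 hj]
      refine ⟨⟨hx0, hxw⟩, ?_⟩
      rw [beq_iff_eq, hqe, hmje]
      have hcast : (i : Int) * f + (j : Int) = ((i * f.toNat + j : Nat) : Int) := by
        push_cast [Int.toNat_of_nonneg hf.le]
        ring
      rw [hcast, Int.toNat_natCast]

-- Mapping every element to [] yields a replicate of the list's length.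
theorem pv_map_const_nil : ∀ (l : List Int), l.map (fun _ => ([] : List Int)) = List.replicate l.length [] := by
  intro l
  induction l with
  | nil => rfl
  | cons x l ih => simp [ih, List.replicate_succ]

-- Flat-mapping a constant replicate yields one big replicate.
theorem pv_flatMap_const_replicate (n : Nat) : ∀ (l : List Int),
    l.flatMap (fun _ => List.replicate n ([] : List Int)) = List.replicate (l.length * n) [] := by
  intro l
  induction l with
  | nil => simp
  | cons x l ih =>
    simp only [List.flatMap_cons, ih, List.length_cons]
    rw [Nat.succ_mul, Nat.add_comm, List.replicate_add]

-- pyRange 0 n 1 for a natural bound is the cast of List.range.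
theorem pv_pyRange_zero_nat (n : Nat) :
    PySem.List.pyRange 0 (n : Int) 1 = (List.range n).map (fun (k : Nat) => (k : Int)) := by
  rw [PySem.List.pyRange_one]
  simp only [sub_zero, Int.toNat_natCast, zero_add]

-- ===== VERDICT (by name: the statement is the Claim_ definition above) =====
theorem get_second_level_rank_lists_py_spec : Claim_equal_get_second_level_rank_lists_py := by
  intro f s ws _ hpre
  obtain ⟨hmod, hbne, hfc, hsc⟩ := hpre
  have hdvd : f * s ∣ ws := Int.dvd_of_emod_eq_zero hmod
  unfold Spec_get_second_level_rank_lists_py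
  unfold get_second_level_rank_lists_py get_second_level_rank_lists_py_alt
  simp only [PySem.Int.floordiv, PySem.Int.mod,
    PySem.List.foldl_append_singleton_eq_map, PySem.List.foldl_append_eq_flatMap,
    List.nil_append]
  have efdws : ws.fdiv (f * s) = ws / (f * s) := by
    rw [Int.fdiv_eq_ediv]
    simp [hdvd]
  rw [efdws]
  by_cases hfs : 0 < f ∧ 0 < s
  · -- both sizes positive: the real case
    obtain ⟨hf, hs⟩ := hfs
    have hblock : 0 < f * s := mul_pos hf hs
    have efd : ∀ a : Int, a.fdiv (f * s) = a / (f * s) := by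
      intro a; rw [Int.fdiv_eq_ediv]; simp [hblock.le]
    have efm : ∀ a : Int, a.fmod (f * s) = a % (f * s) := by
      intro a; rw [Int.fmod_eq_emod]; simp [hblock.le]
    have efmf : ∀ a : Int, a.fmod f = a % f := by
      intro a; rw [Int.fmod_eq_emod]; simp [hf.le]
    simp only [efd, efm, efmf]
    by_cases hws : 0 ≤ ws
    · -- main case
      have hng0 : 0 ≤ ws / (f * s) := Int.ediv_nonneg hws hblock.le
      set G := (ws / (f * s)).toNat with hGdef
      set F := f.toNat with hFdef
      have hGc : (G : Int) = ws / (f * s) := Int.toNat_of_nonneg hng0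
      have hFc : (F : Int) = f := Int.toNat_of_nonneg hf.le
      have hn : (ws / (f * s) * f).toNat = G * F := by
        have key : ws / (f * s) * f = ((G * F : Nat) : Int) := by
          push_cast
          rw [hGc, hFc]
        rw [key, Int.toNat_natCast]
      have hA1 : PySem.List.pyRange 0 (ws / (f * s)) 1 =
          (List.range G).map (fun (k : Nat) => (k : Int)) := by
        rw [← hGc]; exact pv_pyRange_zero_nat G
      have hA2 : PySem.List.pyRange 0 f 1 = (List.range F).map (fun (k : Nat) => (k : Int)) := by
        rw [← hFc]; exact pv_pyRange_zero_nat F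
      have hB : (PySem.List.pyRange 0 ws 1).foldl
          (fun rank_lists r =>
            rank_lists.modify ((r / (f * s) * f + r % (f * s) % f).toNat) (fun l => l ++ [r]))
          (List.replicate (G * F) []) =
          (List.range (G * F)).map
            (fun t => (PySem.List.pyRange 0 ws 1).filter
              (fun r => ((r / (f * s) * f + r % (f * s) % f).toNat == t))) := by
        apply List.ext_getElem?
        intro t
        rw [pv_scatter_get? (fun r => (r / (f * s) * f + r % (f * s) % f).toNat)]
        by_cases ht : t < G * F
        · rw [List.getElem?_replicate, List.getElem?_map, List.getElem?_range ht]
          simp [ht]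
        · rw [List.getElem?_replicate, List.getElem?_map]
          have h2 : (List.range (G * F))[t]? = none := by
            rw [List.getElem?_eq_none]
            simpa using Nat.le_of_not_lt ht
          rw [h2]
          simp [ht]
      rw [hn, hB, pv_range_mul_flatMap F _ G]
      simp only [hA1, hA2]
      rw [List.flatMap_def, List.flatMap_def, List.map_map]
      apply congrArg List.flatten
      apply List.map_congr_left
      intro i hiG
      simp only [Function.comp_apply]
      rw [List.map_map]
      apply List.map_congr_left
      intro j hjF
      simp only [Function.comp_apply]
      have hiG' : (i : Int) < ws / (f * s) := by
        rw [← hGc]; exact_mod_cast List.mem_range.mp hiG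
      have hjF' : (j : Int) < f := by
        rw [← hFc]; exact_mod_cast List.mem_range.mp hjF
      exact (pv_bucket_eq f s ws hf hs hws hdvd i j hiG' hjF').symm
    · -- ws < 0 : both sides are []
      have hwneg : ws < 0 := by omega
      have hngneg : ws / (f * s) < 0 := by
        by_contra hcon
        have hcon' : 0 ≤ ws / (f * s) := not_lt.mp hcon
        have h1 := Int.ediv_add_emod ws (f * s)
        have h2 : 0 ≤ ws % (f * s) := Int.emod_nonneg ws hblock.ne'
        nlinarith
      have hA : PySem.List.pyRange 0 (ws / (f * s)) 1 = [] :=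
        PySem.List.pyRange_one_eq_nil (by omega)
      have hBr : PySem.List.pyRange 0 ws 1 = [] :=
        PySem.List.pyRange_one_eq_nil (by omega)
      have hrep : (ws / (f * s) * f).toNat = 0 := by
        have := mul_neg_of_neg_of_pos hngneg hf
        omega
      rw [hA, hBr, hrep]
      simp
  · -- a degenerate corner admitted by Pre_: world_size = 0, or f > 0 > s with world_size ≤ 0
    by_cases hw0 : ws = 0
    · subst hw0
      simp [PySem.List.pyRange_one_eq_nil (le_refl (0 : Int))]
    · have hf : 0 < f := by
        rcases hfc with h | h
        · exact h
        · exact absurd h hw0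
      have hs0 : s ≤ 0 := by
        by_contra hcon
        exact hfs ⟨hf, not_le.mp hcon⟩
      have hsne : s ≠ 0 := by
        intro he
        exact hbne (by rw [he, mul_zero])
      have hsneg : s < 0 := lt_of_le_of_ne hs0 hsne
      have hwle : ws ≤ 0 := by
        rcases hsc with h | h
        · exact absurd ⟨hf, h⟩ hfs
        · exact h
      have hfsneg : f * s < 0 := mul_neg_of_pos_of_neg hf hsneg
      have hcan : (f * s) * (ws / (f * s)) = ws := Int.mul_ediv_cancel' hdvd
      have hq0 : 0 ≤ ws / (f * s) := by nlinarith [hcan, hfsneg, hwle]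
      have hinner : ∀ i j : Int,
          PySem.List.pyRange (i * f * s + j) ((i + 1) * f * s + j) f = [] := by
        intro i j
        have hle : (i + 1) * f * s + j ≤ i * f * s + j := by
          linarith [show (i + 1) * f * s = i * f * s + f * s from by ring, hfsneg.le]
        rw [PySem.List.pyRange_of_pos _ _ hf, if_neg (not_lt.mpr hle)]
        simp
      simp only [hinner, pv_map_const_nil, PySem.List.length_pyRange_one, sub_zero]
      rw [pv_flatMap_const_replicate, PySem.List.length_pyRange_one, sub_zero,
        PySem.List.pyRange_one_eq_nil hwle, List.foldl_nil]
      have key : ws / (f * s) * f = (((ws / (f * s)).toNat * f.toNat : Nat) : Int) := by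
        push_cast
        rw [Int.toNat_of_nonneg hq0, Int.toNat_of_nonneg hf.le]
      rw [key, Int.toNat_natCast]
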